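-- pv_equiv track=rewrite | github.com/HilaLifchitz/twisstntern_v2 | 5pop.py | count_binary_tree_topologies
-- ===== SOURCE A (Python) =====
-- def count_binary_tree_topologies(n, unrooted=True):
--     """
--     Count the number of distinct labeled binary tree topologies
--     for n leaves. Set unrooted=False for rooted trees.
--     """
--     if n < 2:
--         return 0  # No binary tree with < 2 leaves
--     if n == 2:
--         return 1 if not unrooted else 0  # Only rooted case possible
--
--     k = 2 * n - 3 if not unrooted else 2 * n - 5
--
--     if k <= 1:
--         return 1  # For n = 3, unrooted => (2*3 - 5)!! = 1
--
--     result = 1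
--     while k > 1:
--         result *= k
--         k -= 2
--     return result
-- ===== SOURCE B (Python) =====
-- def _fact(x):
--     f = 1
--     for i in range(2, x + 1):
--         f *= i
--     return f
--
--
-- def count_binary_tree_topologies(n, unrooted=True):
--     """Closed form: k!! = k! // (2**m * m!) with m = (k - 1) // 2."""
--     if n < 2:
--         return 0
--     if n == 2:
--         return 0 if unrooted else 1
--     k = 2 * n - 5 if unrooted else 2 * n - 3
--     if k <= 1:
--         return 1
--     m = (k - 1) // 2
--     return _fact(k) // (2 ** m * _fact(m))
-- ===== Notes on version B (the rewrite author's own statement) =====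
-- stated objective: alternative
-- what changed: Replaces A's descending step-two double-factorial product loop with the closed form k!! = k! // (2**m * m!) where m = (k-1)//2: a plain factorial, a power of two and one exact integer division.
import Mathlib
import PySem

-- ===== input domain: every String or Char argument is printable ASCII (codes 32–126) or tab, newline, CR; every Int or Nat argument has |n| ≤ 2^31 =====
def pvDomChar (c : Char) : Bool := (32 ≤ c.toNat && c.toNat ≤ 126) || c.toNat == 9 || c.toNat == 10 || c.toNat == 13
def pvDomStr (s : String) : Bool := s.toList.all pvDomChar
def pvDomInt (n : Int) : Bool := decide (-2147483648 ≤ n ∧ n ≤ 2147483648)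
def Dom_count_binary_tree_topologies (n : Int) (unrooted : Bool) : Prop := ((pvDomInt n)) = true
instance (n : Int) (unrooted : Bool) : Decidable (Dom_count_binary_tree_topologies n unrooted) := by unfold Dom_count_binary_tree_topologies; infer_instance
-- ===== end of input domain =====

-- B replaces A's descending step-two double-factorial loop with the closed form
-- k!! = k! // (2^m * m!), m = (k-1)//2 (alternative formulation, same cost).

-- ===== PORT A =====
-- the 'while k > 1: result *= k; k -= 2' loop, literally
def pvALoop (result k : Int) : Int :=
  if h : k > 1 then pvALoop (result * k) (k - 2) else result
termination_by k.toNat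
decreasing_by omega

def count_binary_tree_topologies (n : Int) (unrooted : Bool) : Int :=
  if n < 2 then 0
  else if n = 2 then (if !unrooted then 1 else 0)
  else
    let k : Int := if !unrooted then 2 * n - 3 else 2 * n - 5
    if k ≤ 1 then 1
    else pvALoop 1 k

-- ===== PORT B =====
-- B's helper _fact: 'f = 1; for i in range(2, x+1): f *= i'
def pvFact (x : Int) : Int :=
  (PySem.List.pyRange 2 (x + 1) 1).foldl (fun f i => f * i) 1

def count_binary_tree_topologies_alt (n : Int) (unrooted : Bool) : Int :=
  if n < 2 then 0
  else if n = 2 then (if unrooted then 0 else 1)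
  else
    let k : Int := if unrooted then 2 * n - 5 else 2 * n - 3
    if k ≤ 1 then 1
    else
      let m : Int := PySem.Int.floordiv (k - 1) 2
      -- 2 ** m with m ≥ 1 on this branch, so the Nat exponent is exact
      PySem.Int.floordiv (pvFact k) (2 ^ m.toNat * pvFact m)

-- ===== PRECONDITION & SPEC =====
def Spec_count_binary_tree_topologies (n : Int) (unrooted : Bool) (out : Int) : Prop := out = count_binary_tree_topologies_alt n unrooted
instance (n : Int) (unrooted : Bool) (out : Int) : Decidable (Spec_count_binary_tree_topologies n unrooted out) := by unfold Spec_count_binary_tree_topologies; infer_instance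

-- ===== CLAIM (what is proved, stated in full; the proofs are below) =====
def Claim_equal_count_binary_tree_topologies : Prop := ∀ (n : Int) (unrooted : Bool), Dom_count_binary_tree_topologies n unrooted → Spec_count_binary_tree_topologies n unrooted (count_binary_tree_topologies n unrooted)

-- ===== LEMMAS AND PROOFS =====

theorem pvALoop_stop (result k : Int) (h : ¬ k > 1) : pvALoop result k = result := by
  rw [pvALoop]; simp [h]

theorem pvALoop_step (result k : Int) (h : k > 1) :
    pvALoop result k = pvALoop (result * k) (k - 2) := by
  rw [pvALoop]; simp [h]

-- pull a factor out of the accumulator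
theorem pvALoop_mul (r x k : Int) : pvALoop (r * x) k = pvALoop r k * x := by
  by_cases h : k > 1
  · rw [pvALoop_step _ _ h, pvALoop_step r _ h]
    have hx : r * x * k = r * k * x := by ring
    rw [hx, pvALoop_mul (r * k) x (k - 2)]
  · rw [pvALoop_stop _ _ h, pvALoop_stop _ _ h]
termination_by k.toNat
decreasing_by omega

theorem pvFact_succ (x : Int) (hx : 1 ≤ x) : pvFact (x + 1) = pvFact x * (x + 1) := by
  unfold pvFact
  rw [PySem.List.pyRange_one_succ_right (by omega : (2:Int) ≤ x + 1), List.foldl_append]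
  simp

theorem pvFact_nil (x : Int) (h : x ≤ 1) : pvFact x = 1 := by
  rw [pvFact, PySem.List.pyRange_one_eq_nil (by omega)]; rfl

theorem pvFact_three : pvFact 3 = 6 := by
  rw [show (3:Int) = 2 + 1 by norm_num, pvFact_succ _ (by omega),
      show (2:Int) = 1 + 1 by norm_num, pvFact_succ _ (by omega), pvFact_nil 1 (by omega)]
  norm_num

theorem pvFact_pos (m : Nat) : 0 < pvFact (m : Int) := by
  induction m with
  | zero => rw [show ((0:Nat):Int) = 0 by norm_num, pvFact_nil 0 (by omega)]; omega
  | succ m ih =>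
    by_cases h : 1 ≤ (m : Int)
    · rw [show ((m + 1 : Nat) : Int) = (m : Int) + 1 by push_cast; ring, pvFact_succ _ h]
      have : (0:Int) < (m : Int) + 1 := by omega
      positivity
    · have hm : m = 0 := by omega
      subst hm
      rw [show ((0 + 1 : Nat):Int) = 1 by norm_num, pvFact_nil 1 (by omega)]; omega

-- the key identity: (2m+1)! = (2m+1)!! * 2^m * m!
theorem fact_odd (m : Nat) (hm : 1 ≤ m) :
    pvFact (2 * (m : Int) + 1) = pvALoop 1 (2 * (m : Int) + 1) * (2 ^ m * pvFact (m : Int)) := by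
  induction m with
  | zero => omega
  | succ m ih =>
    by_cases h : 1 ≤ m
    · have h1 : (1:Int) ≤ 2 * (m:Int) + 1 := by omega
      have h2 : (1:Int) ≤ 2 * (m:Int) + 2 := by omega
      have e1 : (2 * ((m:Nat) + 1 : Nat) : Int) + 1 = (2 * (m:Int) + 1) + 1 + 1 := by push_cast; ring
      rw [e1, pvFact_succ _ (by omega), pvFact_succ _ h1]
      have eA : pvALoop 1 ((2 * (m:Int) + 1) + 1 + 1) = pvALoop 1 (2 * (m:Int) + 1) * (2 * (m:Int) + 3) := by
        rw [pvALoop_step 1 _ (by omega)]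
        have : (2 * (m:Int) + 1) + 1 + 1 - 2 = 2 * (m:Int) + 1 := by ring
        rw [this, pvALoop_mul 1 (2 * (m:Int) + 1 + 1 + 1) (2 * (m:Int) + 1)]
        ring
      rw [eA]
      have eF : pvFact (((m:Nat) + 1 : Nat) : Int) = pvFact (m:Int) * ((m:Int) + 1) := by
        rw [show (((m:Nat) + 1 : Nat) : Int) = (m:Int) + 1 by push_cast; ring, pvFact_succ _ (by exact_mod_cast h)]
      rw [eF, ih h, pow_succ]
      ring
    · have hm0 : m = 0 := by omega
      subst hm0
      norm_num [pvFact_three, pvFact_nil 1 (by omega : (1:Int) ≤ 1)]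
      rw [pvALoop_step _ _ (by omega), pvALoop_stop _ _ (by omega)]
      norm_num

-- ===== VERDICT (by name: the statement is the Claim_ definition above) =====
theorem count_binary_tree_topologies_spec : Claim_equal_count_binary_tree_topologies := by
  intro n unrooted _
  unfold Spec_count_binary_tree_topologies count_binary_tree_topologies count_binary_tree_topologies_alt
  by_cases h1 : n < 2
  · simp [h1]
  · by_cases h2 : n = 2
    · cases unrooted <;> simp [h2]
    · have hn3 : 3 ≤ n := by omega
      simp only [h1, h2, if_false]
      -- handle both branches uniformly: k = 2n-3 (rooted) or 2n-5 (unrooted)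
      cases unrooted with
      | false =>
        simp only [Bool.not_false, Bool.false_eq_true, if_true, if_false]
        have hk : ¬ (2 * n - 3 ≤ 1) := by omega
        simp only [hk, if_false]
        -- k = 2n-3 = 2*(n-2)+1, m = n-2 ≥ 1
        obtain ⟨p, hp⟩ : ∃ p : Nat, (p : Int) = n - 2 := ⟨(n - 2).toNat, by omega⟩
        have hp1 : 1 ≤ p := by omega
        have hkodd : 2 * n - 3 = 2 * (p : Int) + 1 := by omega
        have hm : PySem.Int.floordiv (2 * n - 3 - 1) 2 = (p : Int) := by
          rw [PySem.Int.floordiv_eq_ediv_of_pos (by omega)]; omega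
        rw [hm, hkodd, fact_odd p hp1]
        have htn : ((p : Int)).toNat = p := by omega
        rw [htn, PySem.Int.floordiv_eq_ediv_of_pos
              (by have := pvFact_pos p; positivity),
            Int.mul_ediv_cancel _ (by have := pvFact_pos p; positivity)]
      | true =>
        simp only [Bool.not_true, Bool.false_eq_true, if_false, if_true]
        by_cases hk : 2 * n - 5 ≤ 1
        · simp only [hk, if_true]
        · simp only [hk, if_false]
          obtain ⟨p, hp⟩ : ∃ p : Nat, (p : Int) = n - 3 := ⟨(n - 3).toNat, by omega⟩
          have hp1 : 1 ≤ p := by omega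
          have hkodd : 2 * n - 5 = 2 * (p : Int) + 1 := by omega
          have hm : PySem.Int.floordiv (2 * n - 5 - 1) 2 = (p : Int) := by
            rw [PySem.Int.floordiv_eq_ediv_of_pos (by omega)]; omega
          rw [hm, hkodd, fact_odd p hp1]
          have htn : ((p : Int)).toNat = p := by omega
          rw [htn, PySem.Int.floordiv_eq_ediv_of_pos
                (by have := pvFact_pos p; positivity),
              Int.mul_ediv_cancel _ (by have := pvFact_pos p; positivity)]
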